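-- pv_equiv track=rewrite | github.com/IES-Rafael-Alberti/2324-u2-sentencias-repetitivas-Lobato14 | src/Ejercicio_1.py | mostrar_palabra_10_veces
-- ===== SOURCE A (Python) =====
-- def mostrar_palabra_10_veces(palabra):
--     palabra = str(palabra)
--     if palabra:
--         numero = 10
--         salida = ""
--         while numero > 0:
--             salida += palabra + "\n"
--             numero -= 1
--         return salida
--     else:
--         return ""
-- ===== SOURCE B (Python) =====
-- def mostrar_palabra_10_veces(palabra):
--     s = str(palabra)
--     return (s + "\n") * 10 if s else ""
-- ===== Notes on version B (the rewrite author's own statement) =====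
-- stated objective: idiomatic
-- what changed: Replaces the while-loop with counter and string accumulator by the closed-form string multiplication (s + "\n") * 10.
import Mathlib
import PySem

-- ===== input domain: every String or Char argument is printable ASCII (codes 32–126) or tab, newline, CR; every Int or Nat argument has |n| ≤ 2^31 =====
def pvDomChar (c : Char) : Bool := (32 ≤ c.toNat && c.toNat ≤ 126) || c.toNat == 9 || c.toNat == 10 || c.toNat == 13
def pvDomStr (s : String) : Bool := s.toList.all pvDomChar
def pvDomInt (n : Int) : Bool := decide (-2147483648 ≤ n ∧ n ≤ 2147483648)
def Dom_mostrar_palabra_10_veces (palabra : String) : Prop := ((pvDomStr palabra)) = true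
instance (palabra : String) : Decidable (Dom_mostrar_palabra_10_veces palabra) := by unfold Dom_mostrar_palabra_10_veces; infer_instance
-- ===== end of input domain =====

-- B replaces A's while-loop with counter and accumulator by the closed-form repetition (s + "\n") * 10 (idiomatic, same cost).

-- ===== PORT A =====
-- A's while loop: numero counts down from 10; salida accumulates palabra + "\n" each pass.
def pvLoopA (numero : Nat) (palabra salida : String) : String :=
  match numero with
  | 0 => salida
  | n + 1 => pvLoopA n palabra (salida ++ (palabra ++ "\n"))

def mostrar_palabra_10_veces (palabra : String) : String :=
  if palabra ≠ "" then pvLoopA 10 palabra "" else ""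

-- ===== PORT B =====
-- (s + "\n") * 10 ported as joining 10 copies.
def mostrar_palabra_10_veces_alt (palabra : String) : String :=
  if palabra ≠ "" then String.join (List.replicate 10 (palabra ++ "\n")) else ""

-- ===== PRECONDITION & SPEC =====
def Spec_mostrar_palabra_10_veces (palabra : String) (out : String) : Prop := out = mostrar_palabra_10_veces_alt palabra
instance (palabra : String) (out : String) : Decidable (Spec_mostrar_palabra_10_veces palabra out) := by unfold Spec_mostrar_palabra_10_veces; infer_instance

-- ===== CLAIM (what is proved, stated in full; the proofs are below) =====
def Claim_equal_mostrar_palabra_10_veces : Prop := ∀ (palabra : String), Dom_mostrar_palabra_10_veces palabra → Spec_mostrar_palabra_10_veces palabra (mostrar_palabra_10_veces palabra)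

-- ===== LEMMAS AND PROOFS =====
theorem pvFoldlAppendShift (l : List String) (a b : String) :
    List.foldl (fun r s => r ++ s) (a ++ b) l = a ++ List.foldl (fun r s => r ++ s) b l := by
  induction l generalizing b with
  | nil => rfl
  | cons x xs ih => simp [List.foldl, String.append_assoc, ih]

theorem pvJoinCons (s : String) (l : List String) :
    String.join (s :: l) = s ++ String.join l := by
  simp [String.join, List.foldl]
  rw [show (s : String) = s ++ "" by simp, pvFoldlAppendShift]
  simp

theorem pvLoopA_eq (n : Nat) (palabra salida : String) :
    pvLoopA n palabra salida = salida ++ String.join (List.replicate n (palabra ++ "\n")) := by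
  induction n generalizing salida with
  | zero => simp [pvLoopA, String.join]
  | succ k ih =>
      rw [pvLoopA, ih, List.replicate_succ, pvJoinCons, String.append_assoc]

-- ===== VERDICT (by name: the statement is the Claim_ definition above) =====
theorem mostrar_palabra_10_veces_spec : Claim_equal_mostrar_palabra_10_veces := by
  intro palabra _
  unfold Spec_mostrar_palabra_10_veces mostrar_palabra_10_veces mostrar_palabra_10_veces_alt
  by_cases h : palabra = ""
  · simp [h]
  · simp [h, pvLoopA_eq]
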